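-- pv_equiv track=rewrite | github.com/shuu5/twill | cli/twl/src/twl/autopilot/plan.py | _topological_phases
-- ===== SOURCE A (Python) =====
-- class PlanError(Exception):
--     """Raised for plan generation errors (exit code 1)."""
--
-- def _topological_phases(
--     issue_uids: list[str],
--     deps: dict[str, list[str]],
-- ) -> list[list[str]]:
--     """Return list of phases where each phase contains issues with all deps resolved."""
--     remaining = list(issue_uids)
--     sorted_uids: list[str] = []
--     phases: list[list[str]] = []
--
--     while remaining:
--         ready = []
--         next_remaining = []
--         for uid in remaining:
--             dep_list = deps.get(uid, [])
--             if all(d in sorted_uids for d in dep_list):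
--                 ready.append(uid)
--             else:
--                 next_remaining.append(uid)
--
--         if not ready:
--             raise PlanError(f"循環依存が検出されました。残り: {remaining}")
--
--         phases.append(ready)
--         sorted_uids.extend(ready)
--         remaining = next_remaining
--
--     return phases
-- ===== SOURCE B (Python) =====
-- class PlanError(Exception):
--     """Raised for plan generation errors (exit code 1)."""
--
-- def _topological_phases(issue_uids, deps):
--     """Layered elimination over residual unmet-dependency lists: membership is
--     tested only against the set of uids emitted in the previous layer, so the
--     O(V) scan of the growing sorted list disappears."""
--     residual = {u: list(deps.get(u, [])) for u in issue_uids}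
--     remaining = list(issue_uids)
--     phases = []
--     while remaining:
--         ready = [u for u in remaining if not residual[u]]
--         if not ready:
--             raise PlanError(f"循環依存が検出されました。残り: {remaining}")
--         phases.append(ready)
--         remaining = [u for u in remaining if residual[u]]
--         done = set(ready)
--         for u in remaining:
--             residual[u] = [d for d in residual[u] if d not in done]
--     return phases
-- ===== Notes on version B (the rewrite author's own statement) =====
-- stated objective: faster
-- what changed: Instead of re-testing every dependency of every remaining uid against the growing sorted_uids list each round, B maintains per-uid residual unmet-dependency lists and filters them against a set of only the uids emitted in the current round, so the O(V) list-membership scan per dependency disappears and the sorted_uids accumulator is dropped entirely.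
import Mathlib
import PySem

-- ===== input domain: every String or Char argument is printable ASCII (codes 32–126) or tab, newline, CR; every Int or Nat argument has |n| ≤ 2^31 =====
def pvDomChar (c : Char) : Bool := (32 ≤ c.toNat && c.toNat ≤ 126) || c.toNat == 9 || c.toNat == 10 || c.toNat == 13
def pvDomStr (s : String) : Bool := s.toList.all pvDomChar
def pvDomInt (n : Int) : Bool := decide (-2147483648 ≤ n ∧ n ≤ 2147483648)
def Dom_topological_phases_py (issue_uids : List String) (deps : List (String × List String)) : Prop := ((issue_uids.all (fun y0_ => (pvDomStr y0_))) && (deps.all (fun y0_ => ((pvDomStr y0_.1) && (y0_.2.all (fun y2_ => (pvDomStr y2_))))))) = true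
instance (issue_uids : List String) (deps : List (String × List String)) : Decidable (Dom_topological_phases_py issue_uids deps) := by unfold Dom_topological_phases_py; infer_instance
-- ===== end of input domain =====

-- B replaces A's per-round rescan of full dependency lists against the growing `sorted_uids`
-- list by incrementally maintained residual unmet-dependency lists filtered against the
-- previous layer's set only (objective: faster elimination loop; same return value).
-- Where the Python raises PlanError (cycle or missing dependency), both ports return the
-- phases built so far; Pre_ excludes exactly those inputs.

-- ===== PORT A =====
-- deps.get(uid, []) — dict parameter as association list, first match (type convention)
def pvDepsGet (deps : List (String × List String)) (u : String) : List String :=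
  PySem.Dict.getD (PySem.Dict.mk deps) u []

-- all(d in sorted_uids for d in deps.get(uid, []))
def pvReadyA (deps : List (String × List String)) (sorted_uids : List String) (uid : String) : Bool :=
  (pvDepsGet deps uid).all (fun d => sorted_uids.contains d)

-- the while-loop of A; fuel = |issue_uids| + 1 rounds always suffice (each successful round
-- strictly shrinks `remaining`); on the `raise PlanError` branch the port returns the phases
-- built so far (excluded by Pre_)
def pvLoopA (deps : List (String × List String)) :
    Nat → List String → List String → List (List String) → List (List String)
  | 0, _, _, phases => phases
  | fuel + 1, remaining, sorted_uids, phases =>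
    if remaining.isEmpty then phases
    else
      -- the for-loop splits `remaining` into ready / next_remaining in order
      let p := remaining.partition (pvReadyA deps sorted_uids)
      if p.1.isEmpty then phases  -- raise PlanError
      else pvLoopA deps fuel p.2 (sorted_uids ++ p.1) (phases ++ [p.1])

def topological_phases_py (issue_uids : List String) (deps : List (String × List String)) : List (List String) :=
  pvLoopA deps (issue_uids.length + 1) issue_uids [] []

-- ===== PORT B =====
-- residual = {u: list(deps.get(u, [])) for u in issue_uids}
def pvResidual0 (deps : List (String × List String)) (issue_uids : List String) :
    PySem.Dict String (List String) :=
  issue_uids.foldl (fun acc u => acc.insert u (pvDepsGet deps u)) PySem.Dict.empty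

-- the while-loop of B; fuel as in A's port, raise branch likewise returns phases so far
def pvLoopB : Nat → List String → PySem.Dict String (List String) → List (List String) → List (List String)
  | 0, _, _, phases => phases
  | fuel + 1, remaining, residual, phases =>
    if remaining.isEmpty then phases
    else
      let ready := remaining.filter (fun u => (residual.getD u []).isEmpty)
      if ready.isEmpty then phases  -- raise PlanError
      else
        let remaining' := remaining.filter (fun u => !(residual.getD u []).isEmpty)
        let done := PySem.Set.ofList ready
        let residual' := remaining'.foldl
          (fun acc u => acc.insert u ((acc.getD u []).filter (fun d => !(PySem.Set.contains done d)))) residual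
        pvLoopB fuel remaining' residual' (phases ++ [ready])

def topological_phases_py_alt (issue_uids : List String) (deps : List (String × List String)) : List (List String) :=
  pvLoopB (issue_uids.length + 1) issue_uids (pvResidual0 deps issue_uids) []

-- ===== PRECONDITION & SPEC =====
-- Pre_ excludes exactly the inputs on which A raises PlanError: those where some nonempty set
-- of issue uids is blocked (each of its members has a dependency that is missing from
-- issue_uids or lies in the set itself — a cycle or an unresolvable dependency).
def Pre_topological_phases_py (issue_uids : List String) (deps : List (String × List String)) : Prop :=
  ¬ ∃ S ∈ (PySem.List.dedup (issue_uids.filter (fun u => !(pvDepsGet deps u).isEmpty))).sublists,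
      S ≠ [] ∧ ∀ u ∈ S, ∃ d ∈ pvDepsGet deps u, d ∉ issue_uids ∨ d ∈ S
instance (issue_uids : List String) (deps : List (String × List String)) : Decidable (Pre_topological_phases_py issue_uids deps) := by unfold Pre_topological_phases_py; infer_instance

def pvWitness_topological_phases_py : List String × (List (String × List String)) :=
  (["a", "b", "c"], [("b", ["a"]), ("c", ["a", "b"])])

def Spec_topological_phases_py (issue_uids : List String) (deps : List (String × List String)) (out : List (List String)) : Prop := out = topological_phases_py_alt issue_uids deps
instance (issue_uids : List String) (deps : List (String × List String)) (out : List (List String)) : Decidable (Spec_topological_phases_py issue_uids deps out) := by unfold Spec_topological_phases_py; infer_instance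

-- ===== CLAIM (what is proved, stated in full; the proofs are below) =====
def Claim_equal_topological_phases_py : Prop := ∀ (issue_uids : List String) (deps : List (String × List String)), Dom_topological_phases_py issue_uids deps → Pre_topological_phases_py issue_uids deps → Spec_topological_phases_py issue_uids deps (topological_phases_py issue_uids deps)

-- ===== LEMMAS AND PROOFS =====

-- a fold of key-dependent inserts: getD afterwards
theorem getD_foldl_insert_fun (f : String → List String) :
    ∀ (L : List String) (acc : PySem.Dict String (List String)) (u : String),
      (L.foldl (fun acc u => acc.insert u (f u)) acc).getD u []
        = if u ∈ L then f u else acc.getD u [] := by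
  intro L
  induction L with
  | nil => intro acc u; simp
  | cons a L ih =>
    intro acc u
    simp only [List.foldl_cons, ih, PySem.Dict.getD_insert, List.mem_cons]
    by_cases hL : u ∈ L <;> by_cases ha : u = a <;> simp [hL, ha]

-- the residual-update fold: each touched key's list gets filtered once (twice = once)
theorem getD_foldl_insert_filter (p : String → Bool) :
    ∀ (L : List String) (acc : PySem.Dict String (List String)) (u : String),
      (L.foldl (fun acc u => acc.insert u ((acc.getD u []).filter p)) acc).getD u []
        = if u ∈ L then (acc.getD u []).filter p else acc.getD u [] := by
  intro L
  induction L with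
  | nil => intro acc u; simp
  | cons a L ih =>
    intro acc u
    simp only [List.foldl_cons, ih, PySem.Dict.getD_insert, List.mem_cons]
    by_cases hL : u ∈ L <;> by_cases ha : u = a <;>
      simp [hL, ha, List.filter_filter]

-- a filtered-out list is empty exactly when every element passes the complement test
theorem isEmpty_filter_not (p : String → Bool) (l : List String) :
    (l.filter (fun d => !(p d))).isEmpty = l.all p := by
  induction l with
  | nil => rfl
  | cons d ds ih => by_cases h : p d = true <;> simp [h, ih]

-- core lockstep lemma: under the residual invariant the two loops return the same phases
theorem loopA_eq_loopB (deps : List (String × List String)) :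
    ∀ (fuel : Nat) (remaining sorted_uids : List String)
      (residual : PySem.Dict String (List String)) (phases : List (List String)),
      (∀ u ∈ remaining,
        residual.getD u [] = (pvDepsGet deps u).filter (fun d => !(sorted_uids.contains d))) →
      pvLoopA deps fuel remaining sorted_uids phases = pvLoopB fuel remaining residual phases := by
  intro fuel
  induction fuel with
  | zero => intro remaining sorted_uids residual phases _; rfl
  | succ fuel ih =>
    intro remaining sorted_uids residual phases hinv
    rw [pvLoopA, pvLoopB]
    by_cases hrem : remaining.isEmpty
    · simp [hrem]
    · simp only [hrem]
      -- readiness predicates agree on members of `remaining`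
      have hpred : ∀ u ∈ remaining,
          (residual.getD u []).isEmpty = pvReadyA deps sorted_uids u := by
        intro u hu
        rw [hinv u hu, pvReadyA]
        exact isEmpty_filter_not (fun d => sorted_uids.contains d) (pvDepsGet deps u)
      have hready : remaining.filter (fun u => (residual.getD u []).isEmpty)
          = (remaining.partition (pvReadyA deps sorted_uids)).1 := by
        rw [List.partition_eq_filter_filter]
        exact List.filter_congr hpred
      have hnext : remaining.filter (fun u => !(residual.getD u []).isEmpty)
          = (remaining.partition (pvReadyA deps sorted_uids)).2 := by
        rw [List.partition_eq_filter_filter]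
        exact List.filter_congr (by intro u hu; simp [Function.comp, ← hpred u hu])
      rw [hready, hnext]
      by_cases hr : (remaining.partition (pvReadyA deps sorted_uids)).1.isEmpty = true
      · simp only [hr, if_true]
      · simp only [hr]
        apply ih
        -- the preserved invariant for the next round
        intro u hu
        have humem : u ∈ remaining := by
          rw [List.partition_eq_filter_filter] at hu
          exact List.mem_of_mem_filter hu
        rw [getD_foldl_insert_filter, if_pos hu, hinv u humem, List.filter_filter]
        apply List.filter_congr
        intro d _
        have hset : PySem.Set.contains (PySem.Set.ofList
            (remaining.partition (pvReadyA deps sorted_uids)).1) d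
            = (remaining.partition (pvReadyA deps sorted_uids)).1.contains d := by
          simp [PySem.Set.contains, PySem.Set.mem_ofList]
        rw [hset]
        simp [Bool.not_or, Bool.and_comm]

-- the initial residual dictionary satisfies the invariant (sorted_uids = [])
theorem residual0_inv (deps : List (String × List String)) (issue_uids : List String) :
    ∀ u ∈ issue_uids,
      (pvResidual0 deps issue_uids).getD u []
        = (pvDepsGet deps u).filter (fun d => !(([] : List String).contains d)) := by
  intro u hu
  rw [pvResidual0, getD_foldl_insert_fun, if_pos hu]
  simp

-- ===== VERDICT (by name: the statement is the Claim_ definition above) =====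
theorem topological_phases_py_spec : Claim_equal_topological_phases_py := by
  unfold Claim_equal_topological_phases_py
  intro issue_uids deps _ _
  unfold Spec_topological_phases_py topological_phases_py topological_phases_py_alt
  exact loopA_eq_loopB deps (issue_uids.length + 1) issue_uids [] (pvResidual0 deps issue_uids) []
    (residual0_inv deps issue_uids)
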